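-- pv_equiv track=rewrite | github.com/belovmd/it-academy-autumn | src/homework5/task3.py | get_packed_block
-- ===== SOURCE A (Python) =====
-- def get_packed_block(start, array):
--     index = start
--     prev_el = array[index]
--     result_array = [prev_el]
--     while 1:
--         index += 1
--         if index == len(array) or array[index] != prev_el + 1:
--             break
--         prev_el = array[index]
--         result_array.append(prev_el)
--     return (result_array, index)
-- ===== SOURCE B (Python) =====
-- def get_packed_block(start, array):
--     first = array[start]
--     nxt = start + 1
--     if nxt == len(array) or array[nxt] != first + 1:
--         return ([first], nxt)
--     rest, end = get_packed_block(nxt, array)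
--     return ([first] + rest, end)
-- ===== Notes on version B (the rewrite author's own statement) =====
-- stated objective: alternative
-- what changed: B is recursive instead of iterative: it recurses on the next index when it continues the run and builds the result list back-to-front by prepending on the unwind, maintaining no loop state (no threaded prev element, no growing accumulator, no index variable).
import Mathlib
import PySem

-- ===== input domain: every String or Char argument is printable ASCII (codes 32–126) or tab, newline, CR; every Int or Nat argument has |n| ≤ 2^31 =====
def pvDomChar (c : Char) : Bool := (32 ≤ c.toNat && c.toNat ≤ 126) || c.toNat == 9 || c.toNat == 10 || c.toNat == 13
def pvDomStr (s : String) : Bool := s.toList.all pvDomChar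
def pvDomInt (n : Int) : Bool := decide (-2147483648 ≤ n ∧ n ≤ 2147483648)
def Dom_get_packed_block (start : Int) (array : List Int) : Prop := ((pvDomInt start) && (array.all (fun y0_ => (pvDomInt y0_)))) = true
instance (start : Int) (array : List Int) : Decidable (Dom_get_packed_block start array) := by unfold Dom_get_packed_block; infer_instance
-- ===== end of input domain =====

-- B is recursive where A is an iterative loop with threaded state: B recurses on the
-- next index and builds the run back-to-front by prepending on the unwind. Return values proved equal.

-- ===== PORT A =====
-- the 'while 1' loop of A: state (index, prev_el, result_array); fuel bounds the
-- number of iterations (2*len+1 always suffices on Pre_, used by the proof below)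
def get_packed_block_loop (array : List Int) : Nat → Int → Int → List Int → List Int × Int
  | 0, index, _, acc => (acc, index)
  | f+1, index, prev, acc =>
    let index' := index + 1
    if index' = (array.length : Int) ∨ PySem.List.pyGetD array index' 0 ≠ prev + 1 then
      (acc, index')
    else
      get_packed_block_loop array f index' (PySem.List.pyGetD array index' 0)
        (acc ++ [PySem.List.pyGetD array index' 0])

def get_packed_block (start : Int) (array : List Int) : List Int × Int :=
  let prev := PySem.List.pyGetD array start 0   -- array[start]; in range on Pre_
  get_packed_block_loop array (2 * array.length + 1) start prev [prev]

-- ===== PORT B =====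
-- Source B's recursion; fuel is only a totality device (2*len suffices on Pre_)
def get_packed_block_alt_rec (array : List Int) : Nat → Int → List Int × Int
  | 0, s => ([PySem.List.pyGetD array s 0], s + 1)
  | f+1, s =>
    if s + 1 = (array.length : Int) ∨
        PySem.List.pyGetD array (s+1) 0 ≠ PySem.List.pyGetD array s 0 + 1 then
      ([PySem.List.pyGetD array s 0], s + 1)
    else
      (PySem.List.pyGetD array s 0 :: (get_packed_block_alt_rec array f (s+1)).1,
       (get_packed_block_alt_rec array f (s+1)).2)

def get_packed_block_alt (start : Int) (array : List Int) : List Int × Int :=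
  get_packed_block_alt_rec array (2 * array.length) start

-- ===== PRECONDITION & SPEC =====
-- Pre_ excludes exactly the inputs where A raises IndexError: array[start] must be in range.
def Pre_get_packed_block (start : Int) (array : List Int) : Prop :=
  -(array.length : Int) ≤ start ∧ start < (array.length : Int)
instance (start : Int) (array : List Int) : Decidable (Pre_get_packed_block start array) := by
  unfold Pre_get_packed_block; infer_instance

def pvWitness_get_packed_block : Int × List Int := (0, [1, 2, 5])

def Spec_get_packed_block (start : Int) (array : List Int) (out : List Int × Int) : Prop := out = get_packed_block_alt start array
instance (start : Int) (array : List Int) (out : List Int × Int) : Decidable (Spec_get_packed_block start array out) := by unfold Spec_get_packed_block; infer_instance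

-- ===== CLAIM (what is proved, stated in full; the proofs are below) =====
def Claim_equal_get_packed_block : Prop := ∀ (start : Int) (array : List Int), Dom_get_packed_block start array → Pre_get_packed_block start array → Spec_get_packed_block start array (get_packed_block start array)

-- ===== LEMMAS AND PROOFS =====

-- B's recursion always returns array[s] as the head of the run
theorem alt_rec_head (array : List Int) : ∀ (f : Nat) (s : Int),
    (get_packed_block_alt_rec array f s).1 =
      PySem.List.pyGetD array s 0 :: ((get_packed_block_alt_rec array f s).1).tail := by
  intro f s
  cases f with
  | zero => simp [get_packed_block_alt_rec]
  | succ f =>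
    unfold get_packed_block_alt_rec
    split <;> simp

-- A's loop entered with prev = array[index] and accumulator acc produces acc ++ the
-- tail of B's run from index, and the same final index.
theorem loop_eq_alt (array : List Int) : ∀ (f : Nat) (index : Int) (acc : List Int),
    index + 1 ≤ (array.length : Int) → (array.length : Int) ≤ index + 1 + f →
    get_packed_block_loop array (f+1) index (PySem.List.pyGetD array index 0) acc =
      (acc ++ ((get_packed_block_alt_rec array f index).1).tail,
       (get_packed_block_alt_rec array f index).2) := by
  intro f
  induction f with
  | zero =>
    intro index acc h1 h2
    have hlen : index + 1 = (array.length : Int) := by omega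
    simp [get_packed_block_loop, get_packed_block_alt_rec, hlen]
  | succ f ih =>
    intro index acc h1 h2
    by_cases hc : index + 1 = (array.length : Int) ∨
        PySem.List.pyGetD array (index+1) 0 ≠ PySem.List.pyGetD array index 0 + 1
    · -- both stop at index+1
      unfold get_packed_block_loop get_packed_block_alt_rec
      rw [if_pos hc, if_pos hc]
      simp
    · push_neg at hc
      obtain ⟨hne, heq⟩ := hc
      have hlt : index + 1 + 1 ≤ (array.length : Int) := by omega
      unfold get_packed_block_loop get_packed_block_alt_rec
      rw [if_neg (by push_neg; exact ⟨hne, heq⟩), if_neg (by push_neg; exact ⟨hne, heq⟩)]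
      rw [ih (index+1) (acc ++ [PySem.List.pyGetD array (index+1) 0]) hlt (by omega)]
      have hh := alt_rec_head array f (index+1)
      simp only [List.tail_cons]
      conv_rhs => rw [hh]
      simp

-- ===== VERDICT (by name: the statement is the Claim_ definition above) =====
theorem get_packed_block_spec : Claim_equal_get_packed_block := by
  intro start array _ hpre
  obtain ⟨h1, h2⟩ := hpre
  unfold Spec_get_packed_block get_packed_block get_packed_block_alt
  simp only []
  rw [show 2 * array.length + 1 = (2 * array.length) + 1 from rfl]
  rw [loop_eq_alt array (2 * array.length) start [PySem.List.pyGetD array start 0]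
    (by omega) (by push_cast; omega)]
  conv_rhs => rw [show get_packed_block_alt_rec array (2 * array.length) start =
    ((get_packed_block_alt_rec array (2 * array.length) start).1,
     (get_packed_block_alt_rec array (2 * array.length) start).2) from rfl]
  rw [alt_rec_head array (2 * array.length) start]
  simp
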